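-- pv_equiv track=rewrite | github.com/vvvaibhaverma-123459876/ai-analyst | agents/funnel_agent.py | _order_stages
-- ===== SOURCE A (Python) =====
-- def _order_stages(stages: list[str]) -> list[str]:
--     """
--     Try to sort stages in logical funnel order using keyword priority.
--     Falls back to alphabetical if no keywords match.
--     """
--     priority = [
--         "signup", "register", "onboard", "kyc", "verify",
--         "initiat", "start", "submit", "payment", "pay",
--         "convert", "complete", "success", "activat",
--     ]
--     def stage_rank(s: str) -> int:
--         sl = s.lower()
--         for i, kw in enumerate(priority):
--             if kw in sl:
--                 return i
--         return len(priority)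
--
--     return sorted(stages, key=stage_rank)
-- ===== SOURCE B (Python) =====
-- def _order_stages(stages: list[str]) -> list[str]:
--     priority = [
--         "signup", "register", "onboard", "kyc", "verify",
--         "initiat", "start", "submit", "payment", "pay",
--         "convert", "complete", "success", "activat",
--     ]
--
--     def stage_rank(s: str) -> int:
--         sl = s.lower()
--         return next((i for i, kw in enumerate(priority) if kw in sl),
--                     len(priority))
--
--     # decorate once, then staged selection: one pass per rank in ascending
--     # order collects the stages of exactly that rank; concatenating the
--     # passes is stable (each pass preserves the original relative order)
--     ranks = [stage_rank(s) for s in stages]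
--     out = []
--     for r in range(len(priority) + 1):
--         out.extend(s for s, k in zip(stages, ranks) if k == r)
--     return out
-- ===== Notes on version B (the rewrite author's own statement) =====
-- stated objective: alternative
-- what changed: Replaces the comparison sort (sorted with a key) by decorate-then-staged-selection: ranks are computed once into a parallel list, then for each rank 0..len(priority) in ascending order one pass over zip(stages, ranks) collects the stages of exactly that rank, and the passes are concatenated; stage_rank is expressed via next() over a generator instead of an explicit loop.
import Mathlib
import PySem

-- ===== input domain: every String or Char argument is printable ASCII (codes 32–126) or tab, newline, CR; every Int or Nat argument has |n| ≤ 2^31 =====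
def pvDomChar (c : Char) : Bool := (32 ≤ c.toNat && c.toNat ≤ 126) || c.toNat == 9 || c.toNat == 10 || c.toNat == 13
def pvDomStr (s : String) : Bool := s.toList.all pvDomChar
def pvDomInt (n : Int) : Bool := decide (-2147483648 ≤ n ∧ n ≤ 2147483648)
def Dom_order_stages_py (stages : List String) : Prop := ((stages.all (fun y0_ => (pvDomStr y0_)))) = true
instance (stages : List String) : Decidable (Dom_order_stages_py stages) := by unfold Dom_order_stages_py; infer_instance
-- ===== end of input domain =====

-- B replaces sorted-with-key by staged selection: one filtering pass per rank, concatenated in ascending rank order (objective: alternative algorithm).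

-- ===== PORT A =====
def pvPriority : List String :=
  ["signup", "register", "onboard", "kyc", "verify",
   "initiat", "start", "submit", "payment", "pay",
   "convert", "complete", "success", "activat"]

-- 'for i, kw in enumerate(priority): if kw in sl: return i' / 'return len(priority)'
def pvStageRankGo (sl : String) : List (Int × String) → Int
  | [] => (pvPriority.length : Int)
  | (i, kw) :: rest => if PySem.Str.isIn kw sl then i else pvStageRankGo sl rest

def pvStageRank (s : String) : Int :=
  pvStageRankGo (PySem.Str.lower s) (PySem.List.enumerate pvPriority)

def order_stages_py (stages : List String) : List String :=
  PySem.List.sorted stages pvStageRank false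

-- ===== PORT B =====
def pvPriorityB : List String :=
  ["signup", "register", "onboard", "kyc", "verify",
   "initiat", "start", "submit", "payment", "pay",
   "convert", "complete", "success", "activat"]

-- 'next((i for i, kw in enumerate(priority) if kw in sl), len(priority))'
def pvRankB (s : String) : Int :=
  let sl := PySem.Str.lower s
  match (PySem.List.enumerate pvPriorityB).find? (fun p => PySem.Str.isIn p.2 sl) with
  | some p => p.1
  | none => (pvPriorityB.length : Int)

-- 'ranks = [stage_rank(s) for s in stages]'
-- 'for r in range(len(priority)+1): out.extend(s for s, k in zip(stages, ranks) if k == r)'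
def order_stages_py_alt (stages : List String) : List String :=
  let ranks := stages.map pvRankB
  (PySem.List.pyRange 0 ((pvPriorityB.length : Int) + 1) 1).foldl
    (fun out r =>
      out ++ ((stages.zip ranks).filter (fun p => p.2 == r)).map (fun p => p.1)) []

-- ===== PRECONDITION & SPEC =====
def Spec_order_stages_py (stages : List String) (out : List String) : Prop := out = order_stages_py_alt stages
instance (stages : List String) (out : List String) : Decidable (Spec_order_stages_py stages out) := by unfold Spec_order_stages_py; infer_instance

-- ===== CLAIM =====
def Claim_equal_order_stages_py : Prop := ∀ (stages : List String), Dom_order_stages_py stages → Spec_order_stages_py stages (order_stages_py stages)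

-- ===== LEMMAS AND PROOFS =====

-- both ports are reduced to this bucket decomposition
def pvBucketsList (n : Nat) (xs : List String) : List (List String) :=
  (List.range n).map (fun (r : Nat) => xs.filter (fun x => pvStageRank x == (r : Int)))

-- B's next-over-generator rank equals A's loop rank
theorem pvRankGo_eq_find (sl : String) (l : List (Int × String)) :
    pvStageRankGo sl l
      = (match l.find? (fun p => PySem.Str.isIn p.2 sl) with
         | some p => p.1
         | none => (pvPriority.length : Int)) := by
  induction l with
  | nil => rfl
  | cons p rest ih =>
    obtain ⟨i, kw⟩ := p
    simp only [pvStageRankGo, List.find?, PySem.Str.isIn] at *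
    by_cases hc : PySem.Chars.isIn kw.toList sl.toList = true
    · simp [hc]
    · rw [Bool.not_eq_true] at hc
      simp [hc, ih]

theorem pvRankB_eq (s : String) : pvRankB s = pvStageRank s := by
  unfold pvStageRank
  rw [pvRankGo_eq_find]
  rfl

theorem pvRankGo_bounds (sl : String) (l : List (Int × String))
    (hl : ∀ p ∈ l, 0 ≤ p.1 ∧ p.1 < 15) :
    0 ≤ pvStageRankGo sl l ∧ pvStageRankGo sl l < 15 := by
  induction l with
  | nil =>
    constructor <;> simp [pvStageRankGo, pvPriority]
  | cons p rest ih =>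
    obtain ⟨i, kw⟩ := p
    simp only [pvStageRankGo]
    split_ifs
    · exact hl (i, kw) (by simp)
    · exact ih (fun q hq => hl q (by simp [hq]))

theorem pvRank_bounds (s : String) : 0 ≤ pvStageRank s ∧ pvStageRank s < 15 := by
  apply pvRankGo_bounds
  intro p hp
  rw [PySem.List.mem_enumerate_iff] at hp
  obtain ⟨j, hj, rfl⟩ := hp
  simp only [pvPriority, List.length_cons, List.length_nil] at hj
  constructor <;> simp <;> omega

theorem pvInsertBy_split (before : String → String → Bool) (x : String)
    (L1 L2 : List String) (h1 : ∀ y ∈ L1, before x y = false)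
    (h2 : ∀ y ∈ L2, before x y = true) :
    PySem.List.insertBy before x (L1 ++ L2) = L1 ++ x :: L2 := by
  induction L1 with
  | nil =>
    cases L2 with
    | nil => rfl
    | cons y ys => simp [PySem.List.insertBy, h2 y (by simp)]
  | cons y l ih =>
    have hy := h1 y (by simp)
    simp only [List.cons_append, PySem.List.insertBy, hy, Bool.false_eq_true, if_false]
    exact congrArg (y :: ·) (ih (fun z hz => h1 z (by simp [hz])))

theorem pvFilter_singleton (s : String) (k : Nat) (hk : pvStageRank s = (k : Int)) (r : Nat) :
    [s].filter (fun z => pvStageRank z == (r : Int)) = if r = k then [s] else [] := by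
  by_cases h : r = k
  · simp [List.filter, hk, h]
  · have : ((k : Int) == (r : Int)) = false := by
      simp
      omega
    simp [List.filter, hk, this]
    omega

set_option maxHeartbeats 1000000 in
theorem pvBuckets_step (n : Nat) (xs : List String) (x : String)
    (h0 : 0 ≤ pvStageRank x) (h1 : pvStageRank x < (n : Int)) :
    (pvBucketsList n (xs ++ [x])).flatten
      = PySem.List.insertBy (fun a b => decide (pvStageRank a < pvStageRank b)) x
          (pvBucketsList n xs).flatten := by
  have hk : pvStageRank x = (((pvStageRank x).toNat : Nat) : Int) := by omega
  set k : Nat := (pvStageRank x).toNat with hkdef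
  have hkn : k + 1 <= n := by omega
  have hsplit : List.range n = List.range (k+1) ++ (List.range (n - (k+1))).map (fun j => (k+1) + j) := by
    rw [<- List.range_add]
    congr 1
    omega
  have flatsplit : ∀ (ys : List String),
      (pvBucketsList n ys).flatten
        = ((List.range (k+1)).map (fun (r : Nat) => ys.filter (fun z => pvStageRank z == (r : Int)))).flatten
          ++ ((List.range (n - (k+1))).map (fun (j : Nat) => ys.filter (fun z => pvStageRank z == (((k+1) + j : Nat) : Int)))).flatten := by
    intro ys
    rw [pvBucketsList, hsplit, List.map_append, List.flatten_append, List.map_map]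
    rfl
  rw [flatsplit, flatsplit]
  set L1 := ((List.range (k+1)).map (fun (r : Nat) => xs.filter (fun z => pvStageRank z == (r : Int)))).flatten with hL1
  set L2 := ((List.range (n - (k+1))).map (fun (j : Nat) => xs.filter (fun z => pvStageRank z == (((k+1) + j : Nat) : Int)))).flatten with hL2
  have e1 : ∀ y ∈ L1, (decide (pvStageRank x < pvStageRank y)) = false := by
    intro y hy
    simp only [hL1, List.mem_flatten, List.mem_map] at hy
    obtain ⟨l, ⟨r, hr, rfl⟩, hyl⟩ := hy
    have hv := (List.mem_filter.mp hyl).2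
    simp only [beq_iff_eq] at hv
    simp only [List.mem_range] at hr
    simp only [decide_eq_false_iff_not, not_lt, hv, hk]
    exact_mod_cast Nat.le_of_lt_succ hr
  have e2 : ∀ y ∈ L2, (decide (pvStageRank x < pvStageRank y)) = true := by
    intro y hy
    simp only [hL2, List.mem_flatten, List.mem_map] at hy
    obtain ⟨l, ⟨j, hj, rfl⟩, hyl⟩ := hy
    have hv := (List.mem_filter.mp hyl).2
    simp only [beq_iff_eq] at hv
    simp only [decide_eq_true_eq, hv, hk]
    push_cast
    omega
  rw [pvInsertBy_split _ x L1 L2 e1 e2]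
  have hxs1 : ((List.range (k+1)).map (fun (r : Nat) => (xs ++ [x]).filter (fun z => pvStageRank z == (r : Int)))).flatten
      = L1 ++ [x] := by
    have hr : List.range (k+1) = List.range k ++ [k] := by simpa using List.range_succ (n := k)
    rw [hr, hL1]
    simp only [List.map_append, List.flatten_append, List.filter_append,
      pvFilter_singleton x k hk, List.map_cons, List.map_nil, List.flatten_cons,
      List.flatten_nil, List.append_nil]
    have h1 : ∀ r ∈ List.range k,
        (xs.filter (fun z => pvStageRank z == (r : Int)) ++ if r = k then [x] else [])
          = xs.filter (fun z => pvStageRank z == (r : Int)) := by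
      intro r hrm
      simp only [List.mem_range] at hrm
      simp [Nat.ne_of_lt hrm]
    rw [List.map_congr_left h1, hr]
    simp [List.append_assoc]
  have hxs2 : ((List.range (n - (k+1))).map (fun (j : Nat) => (xs ++ [x]).filter (fun z => pvStageRank z == (((k+1) + j : Nat) : Int)))).flatten
      = L2 := by
    rw [hL2]
    refine congrArg List.flatten ?_
    apply List.map_congr_left
    intro j hj
    rw [List.filter_append, pvFilter_singleton x k hk]
    have hne : ¬ ((k+1) + j = k) := by omega
    simp [hne]
  rw [hxs1, hxs2]
  simp

theorem pvRank_bounds15 (s : String) : 0 ≤ pvStageRank s ∧ pvStageRank s < ((15 : Nat) : Int) := by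
  have := pvRank_bounds s
  push_cast
  omega

-- A's insertion sort equals the flattened buckets
theorem pvFoldl_insert_eq (xs : List String) :
    xs.foldl (fun acc x => PySem.List.insertBy (fun a b => decide (pvStageRank a < pvStageRank b)) x acc) []
      = (pvBucketsList 15 xs).flatten := by
  induction xs using List.reverseRecOn with
  | nil => simp [pvBucketsList]
  | append_singleton xs x ih =>
    rw [List.foldl_append, List.foldl_cons, List.foldl_nil, ih,
      <- pvBuckets_step 15 xs x (pvRank_bounds15 x).1 (pvRank_bounds15 x).2]

-- B's staged selection equals the flattened buckets
-- the zip-with-precomputed-ranks pass selects exactly the stages of rank r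
theorem pvZip_filter (stages : List String) (r : Int) :
    ((stages.zip (stages.map pvRankB)).filter (fun p => p.2 == r)).map (fun p => p.1)
      = stages.filter (fun s => pvRankB s == r) := by
  induction stages with
  | nil => rfl
  | cons s rest ih =>
    simp only [List.map_cons, List.zip_cons_cons, List.filter]
    by_cases h : (pvRankB s == r) = true
    · simp [h, ih]
    · rw [Bool.not_eq_true] at h
      simp [h, ih]

theorem pvAlt_eq_buckets (stages : List String) :
    order_stages_py_alt stages = (pvBucketsList 15 stages).flatten := by
  unfold order_stages_py_alt pvBucketsList
  simp only [pvZip_filter]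
  rw [PySem.List.foldl_append_eq_flatMap, List.flatMap_def]
  have hr : PySem.List.pyRange 0 ((pvPriorityB.length : Int) + 1) 1
      = (List.range 15).map (fun (k : Nat) => (k : Int)) := by
    rw [show ((pvPriorityB.length : Int) + 1) = 15 from by rfl, PySem.List.pyRange_one]
    norm_num
    rfl
  rw [hr, List.map_map]
  simp only [List.nil_append]
  refine congrArg List.flatten (List.map_congr_left ?_)
  intro k _
  simp only [Function.comp_apply]
  refine List.filter_congr ?_
  intro s _
  rw [pvRankB_eq]

theorem order_stages_py_spec : Claim_equal_order_stages_py := by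
  intro stages _
  unfold Spec_order_stages_py order_stages_py
  rw [PySem.List.sorted_eq_foldl_insertBy, pvFoldl_insert_eq, pvAlt_eq_buckets]
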